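-- pv_equiv track=rewrite | github.com/jano31415/codejam | codeforces/727_round_div2/probc.py | solve
-- ===== SOURCE A (Python) =====
-- def solve(n, k,x ,numbers):
--     numbers.sort()
--     grp_diff = []
--     for i,a in enumerate(numbers):
--         if i ==0:
--             continue
--         if numbers[i] - numbers[i-1] > x:
--             grp_diff.append(numbers[i] - numbers[i-1])
--     grp_diff.sort()
--     k_left = k
--     for i,diff in enumerate(grp_diff):
--         new_needed = diff//x
--         if diff == x * new_needed:
--             new_needed -= 1
--         if k_left >= new_needed:
--             k_left -= new_needed
--         else:
--             return len(grp_diff) - i + 1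
--     return 1
-- ===== SOURCE B (Python) =====
-- def solve(n, k, x, numbers):
--     ys = sorted(numbers)
--     costs = sorted((b - a - 1) // x for a, b in zip(ys, ys[1:]) if b - a > x)
--     prefix = [0]
--     total = 0
--     for c in costs:
--         total += c
--         prefix.append(total)
--     lo, hi = 0, len(costs)
--     while lo < hi:
--         mid = (lo + hi + 1) // 2
--         if prefix[mid] <= k:
--             lo = mid
--         else:
--             hi = mid - 1
--     return len(costs) - lo + 1
-- ===== Notes on version B (the rewrite author's own statement) =====
-- stated objective: alternative
-- what changed: Replaces A's running-budget greedy loop with early return by a staged computation: sort the per-gap merge costs (b-a-1)//x, build a prefix-sum table, and binary-search for the largest prefix whose total cost fits in k; the answer is len(costs) - that index + 1.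
-- outside the precondition, e.g. on solve(5, -3, -1, [-1, -8, 10, 8, -7]): A returns 5, B returns 1; on solve(2, 0, 0, [0, 5]): A raises ZeroDivisionError, B raises ZeroDivisionError
import Mathlib
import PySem

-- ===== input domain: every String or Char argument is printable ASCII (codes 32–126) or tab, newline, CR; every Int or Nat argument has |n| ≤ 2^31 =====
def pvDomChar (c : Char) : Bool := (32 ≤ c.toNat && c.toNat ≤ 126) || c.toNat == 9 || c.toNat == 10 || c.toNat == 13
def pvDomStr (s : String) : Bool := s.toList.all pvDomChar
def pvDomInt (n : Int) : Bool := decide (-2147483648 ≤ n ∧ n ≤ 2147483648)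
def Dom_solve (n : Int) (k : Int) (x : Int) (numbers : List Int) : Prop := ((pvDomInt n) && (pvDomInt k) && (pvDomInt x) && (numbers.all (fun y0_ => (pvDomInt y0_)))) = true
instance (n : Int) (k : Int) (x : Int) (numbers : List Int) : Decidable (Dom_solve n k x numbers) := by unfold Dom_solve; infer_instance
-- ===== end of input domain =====

-- B replaces A's running-budget greedy loop (early return) by prefix sums over the sorted
-- merge costs plus a binary search for the largest affordable prefix; return values agree
-- (A also sorts the `numbers` list in place, B does not — the equivalence proved here is
-- about the return value only).

-- ===== PORT A =====
-- consecutive differences > x of the (sorted) list, in order — A's first loop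
def gapsA (x : Int) : List Int → List Int
  | [] => []
  | [_] => []
  | a :: b :: rest =>
      if b - a > x then (b - a) :: gapsA x (b :: rest) else gapsA x (b :: rest)

-- A's second loop: early return `len - i + 1`, otherwise fall through to 1
def loopA (x : Int) (len : Int) : List Int → Int → Int → Int
  | [], _, _ => 1
  | diff :: rest, i, kl =>
      let nn0 := PySem.Int.floordiv diff x
      let nn := if diff = x * nn0 then nn0 - 1 else nn0
      if kl ≥ nn then loopA x len rest (i + 1) (kl - nn)
      else len - i + 1

def solve (n : Int) (k : Int) (x : Int) (numbers : List Int) : Int :=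
  let nums := PySem.List.sorted numbers (fun y => y) false
  let grp_diff := gapsA x nums
  let grp_diff := PySem.List.sorted grp_diff (fun y => y) false
  loopA x (grp_diff.length : Int) grp_diff 0 k

-- ===== PORT B =====
-- one step of B's prefix-sum loop: state = (prefix list, running total)
def prefixStep : (List Int × Int) → Int → (List Int × Int) :=
  fun pr c => (pr.1 ++ [pr.2 + c], pr.2 + c)

-- B's `while lo < hi` binary search (indices are provably nonnegative in the Python loop,
-- ported as Nat; `(lo + hi + 1) // 2` on nonnegative ints is Nat division)
def bsearchB (pre : List Int) (k : Int) (lo hi : Nat) : Nat :=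
  if lo < hi then
    let mid := (lo + hi + 1) / 2
    if pre.getD mid 0 ≤ k then bsearchB pre k mid hi
    else bsearchB pre k lo (mid - 1)
  else lo
termination_by hi - lo
decreasing_by all_goals omega

def solve_alt (n : Int) (k : Int) (x : Int) (numbers : List Int) : Int :=
  let ys := PySem.List.sorted numbers (fun y => y) false
  let costs := PySem.List.sorted
      ((ys.zip ys.tail).filterMap
        (fun p => if p.2 - p.1 > x then some (PySem.Int.floordiv (p.2 - p.1 - 1) x) else none))
      (fun y => y) false
  let pr := costs.foldl prefixStep ([0], 0)
  let lo := bsearchB pr.1 k 0 costs.length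
  (costs.length : Int) - (lo : Int) + 1

-- ===== PRECONDITION & SPEC =====
-- Pre_ restricts to the problem's natural domain x ≥ 1 (the Codeforces task guarantees it):
-- with x = 0 A raises ZeroDivisionError whenever a positive gap exists, and for x < 0 A's
-- floor-divisions by a negative x produce values outside the task's meaning.
def Pre_solve (n : Int) (k : Int) (x : Int) (numbers : List Int) : Prop := 1 ≤ x
instance (n : Int) (k : Int) (x : Int) (numbers : List Int) : Decidable (Pre_solve n k x numbers) := by unfold Pre_solve; infer_instance
def pvWitness_solve : Int × Int × Int × List Int := (4, 2, 2, [1, 10, 20, 30])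
def Spec_solve (n : Int) (k : Int) (x : Int) (numbers : List Int) (out : Int) : Prop := out = solve_alt n k x numbers
instance (n : Int) (k : Int) (x : Int) (numbers : List Int) (out : Int) : Decidable (Spec_solve n k x numbers out) := by unfold Spec_solve; infer_instance

-- ===== CLAIM (what is proved, stated in full; the proofs are below) =====
def Claim_equal_solve : Prop := ∀ (n : Int) (k : Int) (x : Int) (numbers : List Int), Dom_solve n k x numbers → Pre_solve n k x numbers → Spec_solve n k x numbers (solve n k x numbers)

-- ===== LEMMAS AND PROOFS =====

-- the cost of merging a gap d (> x): (d-1)//x, as B computes it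
def costFn (x d : Int) : Int := PySem.Int.floordiv (d - 1) x

-- prefix sum of the first m costs
def psum (L : List Int) (m : Nat) : Int := (L.take m).sum

-- greedy count of affordable costs, taken in order
def grab : List Int → Int → Nat
  | [], _ => 0
  | c :: rest, kl => if kl ≥ c then grab rest (kl - c) + 1 else 0

-- A's in-loop cost computation equals costFn, for gaps d > x ≥ 1
theorem costA_eq (x d : Int) (hx : 1 ≤ x) (hd : x < d) :
    (if d = x * PySem.Int.floordiv d x then PySem.Int.floordiv d x - 1 else PySem.Int.floordiv d x) = costFn x d := by
  have hx0 : (0:Int) < x := by omega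
  have hq := (PySem.Int.floordiv_eq_iff_of_pos (a := d) (q := PySem.Int.floordiv d x) hx0).mp rfl
  unfold costFn
  have he1 : (PySem.Int.floordiv d x - 1) * x = PySem.Int.floordiv d x * x - x := by ring
  have he2 : (PySem.Int.floordiv d x - 1 + 1) * x = PySem.Int.floordiv d x * x := by ring
  by_cases h : d = x * PySem.Int.floordiv d x
  · rw [if_pos h]
    symm
    rw [PySem.Int.floordiv_eq_iff_of_pos hx0]
    constructor <;> nlinarith [hq.1, hq.2]
  · rw [if_neg h]
    symm
    rw [PySem.Int.floordiv_eq_iff_of_pos hx0]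
    have hne : d ≠ PySem.Int.floordiv d x * x := by rw [mul_comm] at h; exact fun hc => h hc
    constructor <;> omega

theorem gapsA_mem (x : Int) : ∀ (l : List Int), ∀ d ∈ gapsA x l, x < d
  | [] => by simp [gapsA]
  | [a] => by simp [gapsA]
  | a :: b :: rest => by
      intro d hd
      by_cases h : b - a > x
      · simp only [gapsA, if_pos h, List.mem_cons] at hd
        rcases hd with rfl | hd
        · exact h
        · exact gapsA_mem x (b :: rest) d hd
      · simp only [gapsA, if_neg h] at hd
        exact gapsA_mem x (b :: rest) d hd

-- costFn is monotone in d for x ≥ 1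
theorem costFn_mono (x a b : Int) (hx : 1 ≤ x) (h : a ≤ b) : costFn x a ≤ costFn x b := by
  have hx0 : (0:Int) < x := by omega
  unfold costFn
  rw [PySem.Int.le_floordiv_iff_mul_le hx0]
  have := (PySem.Int.le_floordiv_iff_mul_le (a := a - 1) (b := x)
    (q := PySem.Int.floordiv (a - 1) x) hx0).mp le_rfl
  omega

theorem costFn_pos (x d : Int) (hx : 1 ≤ x) (hd : x < d) : 1 ≤ costFn x d := by
  have hx0 : (0:Int) < x := by omega
  unfold costFn
  rw [PySem.Int.le_floordiv_iff_mul_le hx0]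
  omega

-- A's loop equals `len - (i + grab costs) + 1` (grab stops at the first unaffordable cost,
-- exactly as A's early return does)
theorem loopA_eq_grab (x : Int) (hx : 1 ≤ x) :
    ∀ (L : List Int) (len i kl : Int), (∀ d ∈ L, x < d) → len = i + (L.length : Int) →
      loopA x len L i kl = len - (i + ((grab (L.map (costFn x)) kl : Nat) : Int)) + 1
  | [], len, i, kl, _, hlen => by
      simp only [List.length_nil, Nat.cast_zero, add_zero] at hlen
      simp only [loopA, List.map_nil, grab, Nat.cast_zero]
      omega
  | d :: rest, len, i, kl, hmem, hlen => by
      have hd : x < d := hmem d (by simp)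
      simp only [loopA, List.map_cons, grab]
      rw [costA_eq x d hx hd]
      by_cases h : kl ≥ costFn x d
      · rw [if_pos h, if_pos h,
          loopA_eq_grab x hx rest len (i + 1) (kl - costFn x d)
            (fun u hu => hmem u (by simp [hu])) (by simp at hlen ⊢; omega)]
        push_cast; ring
      · rw [if_neg h, if_neg h]
        push_cast; ring

-- ---------- B side ----------

-- B's comprehension computes the mapped costs of A's gaps
theorem filterMap_eq (x : Int) : ∀ (l : List Int),
    (l.zip l.tail).filterMap
        (fun p => if p.2 - p.1 > x then some (PySem.Int.floordiv (p.2 - p.1 - 1) x) else none)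
      = (gapsA x l).map (costFn x)
  | [] => by simp [gapsA]
  | [a] => by simp [gapsA]
  | a :: b :: rest => by
      have ih := filterMap_eq x (b :: rest)
      simp only [List.tail_cons, List.zip_cons_cons, List.filterMap_cons] at ih ⊢
      by_cases h : b - a > x
      · simp only [if_pos h, gapsA, List.map_cons, ih, costFn]
      · simp only [if_neg h, gapsA, ih]

-- sorting the gaps then mapping the monotone costFn = sorting the mapped costs
theorem sorted_map_eq (x : Int) (hx : 1 ≤ x) (g : List Int) :
    (PySem.List.sorted g (fun y => y) false).map (costFn x)
      = PySem.List.sorted (g.map (costFn x)) (fun y => y) false := by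
  symm
  apply PySem.List.sorted_id_eq_of_perm_of_pairwise
  · exact (PySem.List.sorted_perm g (fun y => y) false).map _
  · exact (List.pairwise_map).mpr
      ((PySem.List.sorted_pairwise g (fun y => y)).imp (fun h => costFn_mono x _ _ hx h))

-- the prefix-sum fold builds the table of psum values
theorem prefix_fold : ∀ (L : List Int) (pr : List Int) (t : Int),
    (L.foldl prefixStep (pr, t)).1
      = pr ++ (List.range L.length).map (fun i => t + psum L (i + 1))
  | [], pr, t => by simp
  | c :: rest, pr, t => by
      simp only [List.foldl_cons, prefixStep, prefix_fold rest (pr ++ [t + c]) (t + c),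
        List.length_cons, List.range_succ_eq_map, List.map_cons, List.map_map]
      simp [psum, Function.comp, add_assoc]

theorem psum_zero (L : List Int) : psum L 0 = 0 := by simp [psum]

theorem getD_prefix (L : List Int) (m : Nat) (hm : m ≤ L.length) :
    (((0:Int) :: (List.range L.length).map (fun i => psum L (i + 1))).getD m 0) = psum L m := by
  cases m with
  | zero => simp [psum]
  | succ j =>
      have hj : j < L.length := by omega
      have hlen : j < ((List.range L.length).map (fun i => psum L (i + 1))).length := by simp [hj]
      simp [hj]

theorem psum_nonneg (L : List Int) (hc : ∀ c ∈ L, 0 ≤ c) (m : Nat) : 0 ≤ psum L m := by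
  apply List.sum_nonneg
  intro c hcm
  exact hc c (List.mem_of_mem_take hcm)

theorem psum_mono : ∀ (L : List Int), (∀ c ∈ L, 0 ≤ c) → ∀ (m j : Nat), psum L m ≤ psum L (m + j)
  | [], _, m, j => by simp [psum]
  | c :: rest, hc, 0, j => by
      simp only [Nat.zero_add, psum_zero]
      exact psum_nonneg _ hc j
  | c :: rest, hc, m + 1, j => by
      have : m + 1 + j = (m + j) + 1 := by omega
      rw [this]
      simp only [psum, List.take_succ_cons, List.sum_cons]
      have := psum_mono rest (fun u hu => hc u (by simp [hu])) m j
      unfold psum at this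
      omega

theorem grab_le_length : ∀ (L : List Int) (kl : Int), grab L kl ≤ L.length
  | [], _ => by simp [grab]
  | c :: rest, kl => by
      simp only [grab, List.length_cons]
      split_ifs
      · have := grab_le_length rest (kl - c); omega
      · omega

theorem psum_grab_le : ∀ (L : List Int) (kl : Int), 0 < grab L kl → psum L (grab L kl) ≤ kl
  | [], kl, h => by simp [grab] at h
  | c :: rest, kl, h => by
      simp only [grab] at h ⊢
      by_cases hk : kl ≥ c
      · rw [if_pos hk] at h ⊢
        simp only [psum, List.take_succ_cons, List.sum_cons]
        by_cases hg : 0 < grab rest (kl - c)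
        · have := psum_grab_le rest (kl - c) hg
          unfold psum at this; omega
        · have : grab rest (kl - c) = 0 := by omega
          rw [this]
          simp only [psum, List.take_zero, List.sum_nil]
          omega
      · rw [if_neg hk] at h; omega

theorem grab_ge : ∀ (L : List Int) (kl : Int) (m : Nat), (∀ c ∈ L, 0 ≤ c) →
    m ≤ L.length → psum L m ≤ kl → m ≤ grab L kl
  | _, _, 0, _, _, _ => by omega
  | [], _, m + 1, _, hm, _ => by simp at hm
  | c :: rest, kl, m + 1, hc, hm, hp => by
      simp only [psum, List.take_succ_cons, List.sum_cons] at hp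
      have hc0 : (0:Int) ≤ c := hc c (by simp)
      have hrest : ∀ u ∈ rest, (0:Int) ≤ u := fun u hu => hc u (by simp [hu])
      have hpn : 0 ≤ psum rest m := psum_nonneg rest hrest m
      unfold psum at hpn
      have hck : c ≤ kl := by omega
      simp only [grab, if_pos (by omega : kl ≥ c)]
      have := grab_ge rest (kl - c) m hrest (by simp at hm; omega)
        (by unfold psum; omega)
      omega

-- binary search returns any g whose prefix characterizes affordability on (lo, hi]
theorem bsearch_eq (pre : List Int) (k : Int) (g : Nat) : ∀ (lo hi : Nat),
    lo ≤ g → g ≤ hi → (∀ m, lo < m → m ≤ hi → (pre.getD m 0 ≤ k ↔ m ≤ g)) →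
    bsearchB pre k lo hi = g
  | lo, hi, h1, h2, h3 => by
      rw [bsearchB]
      by_cases hlh : lo < hi
      · rw [if_pos hlh]
        have hmid1 : lo < (lo + hi + 1) / 2 := by omega
        have hmid2 : (lo + hi + 1) / 2 ≤ hi := by omega
        by_cases hp : pre.getD ((lo + hi + 1) / 2) 0 ≤ k
        · rw [if_pos hp]
          exact bsearch_eq pre k g ((lo + hi + 1) / 2) hi
            ((h3 _ hmid1 hmid2).mp hp) h2
            (fun m hm1 hm2 => h3 m (by omega) hm2)
        · rw [if_neg hp]
          have hgm : g < (lo + hi + 1) / 2 := by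
            by_contra hcon
            exact hp ((h3 _ hmid1 hmid2).mpr (by omega))
          exact bsearch_eq pre k g lo ((lo + hi + 1) / 2 - 1) h1 (by omega)
            (fun m hm1 hm2 => h3 m hm1 (by omega))
      · rw [if_neg hlh]
        omega
  termination_by lo hi => hi - lo
  decreasing_by all_goals omega

-- ===== VERDICT (by name: the statement is the Claim_ definition above) =====
theorem solve_spec : Claim_equal_solve := by
  intro n k x numbers _ hx
  unfold Spec_solve solve solve_alt
  have hx' : (1:Int) ≤ x := hx
  set ys := PySem.List.sorted numbers (fun y => y) false with hys
  dsimp only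
  -- B's cost list is the sorted mapped gap costs
  rw [filterMap_eq x ys]
  set L := PySem.List.sorted ((gapsA x ys).map (costFn x)) (fun y => y) false with hL
  have hLmem : ∀ c ∈ L, (1:Int) ≤ c := by
    intro c hc
    rw [hL, PySem.List.mem_sorted, List.mem_map] at hc
    rcases hc with ⟨d, hd, rfl⟩
    exact costFn_pos x d hx' (gapsA_mem x ys d hd)
  have hLnn : ∀ c ∈ L, (0:Int) ≤ c := fun c hc => le_trans (by norm_num) (hLmem c hc)
  -- A side
  have hmemA : ∀ d ∈ PySem.List.sorted (gapsA x ys) (fun y => y) false, x < d := by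
    intro d hd
    rw [PySem.List.mem_sorted] at hd
    exact gapsA_mem x ys d hd
  rw [loopA_eq_grab x hx' _ _ 0 k hmemA (by simp)]
  rw [sorted_map_eq x hx' (gapsA x ys), ← hL]
  -- B side: the prefix table and the binary search
  rw [prefix_fold L [0] 0]
  have hpr : ([ (0:Int) ] ++ (List.range L.length).map (fun i => 0 + psum L (i + 1)))
      = ((0:Int) :: (List.range L.length).map (fun i => psum L (i + 1))) := by
    simp
  rw [hpr]
  rw [bsearch_eq _ k (grab L k) 0 L.length (by omega) (grab_le_length L k) ?_]
  · have h1 : (PySem.List.sorted (gapsA x ys) (fun y => y) false).length = L.length := by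
      rw [hL, PySem.List.length_sorted, PySem.List.length_sorted, List.length_map]
    rw [h1]; ring
  · intro m hm1 hm2
    rw [getD_prefix L m hm2]
    constructor
    · intro hp
      exact grab_ge L k m hLnn hm2 hp
    · intro hmg
      have hg0 : 0 < grab L k := by omega
      have h1 := psum_grab_le L k hg0
      have h2 := psum_mono L hLnn m (grab L k - m)
      have : m + (grab L k - m) = grab L k := by omega
      rw [this] at h2
      omega
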